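-- pv_equiv track=rewrite | github.com/paiml/depyler | examples/hard_simpson_rule.py | simpson_integrate_scaled
-- ===== SOURCE A (Python) =====
-- def simpson_integrate_scaled(a: int, b: int, c: int, lo: int, hi: int, n: int, scale: int) -> int:
--     # Simpson's 1/3 rule for f(x) = a*x^2 + b*x + c over [lo, hi]
--     # x-values are in units of scale (lo=0, hi=scale means [0, 1])
--     # Returns integral * scale^2 / scale = integral * scale
--     if n % 2 != 0:
--         n = n + 1
--     h: int = (hi - lo) // n
--     f_lo: int = a * lo * lo + b * lo * scale + c * scale * scale
--     f_hi: int = a * hi * hi + b * hi * scale + c * scale * scale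
--     total: int = f_lo + f_hi
--     i: int = 1
--     while i < n:
--         x: int = lo + i * h
--         fx: int = a * x * x + b * x * scale + c * scale * scale
--         if i % 2 == 0:
--             total = total + 2 * fx
--         else:
--             total = total + 4 * fx
--         i = i + 1
--     return total * h // (3 * scale * scale)
-- ===== SOURCE B (Python) =====
-- def simpson_integrate_scaled(a: int, b: int, c: int, lo: int, hi: int, n: int, scale: int) -> int:
--     # Closed-form: the Simpson-weighted sums of 1, x, x^2 over the interior
--     # nodes x_i = lo + i*h (i = 1..n-1, weight 4 odd / 2 even) are polynomials in k = n//2.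
--     if n % 2 != 0:
--         n = n + 1
--     h = (hi - lo) // n
--     f_lo = a * lo * lo + b * lo * scale + c * scale * scale
--     f_hi = a * hi * hi + b * hi * scale + c * scale * scale
--     if n >= 2:
--         k = n // 2
--         w0 = 6 * k - 2                 # sum of weights
--         w1 = 6 * k * k - 2 * k         # sum of weight*i
--         w2 = 4 * k * k * (2 * k - 1)   # sum of weight*i^2
--         s1 = lo * w0 + h * w1
--         s2 = lo * lo * w0 + 2 * lo * h * w1 + h * h * w2
--         total = f_lo + f_hi + a * s2 + b * scale * s1 + c * scale * scale * w0
--     else: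
--         total = f_lo + f_hi
--     return total * h // (3 * scale * scale)
-- ===== Notes on version B (the rewrite author's own statement) =====
-- stated objective: faster
-- what changed: Replaced the O(n) while-loop over interior nodes by closed-form polynomial formulas (in k = n//2) for the Simpson-weighted sums of 1, x and x^2.
import Mathlib
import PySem

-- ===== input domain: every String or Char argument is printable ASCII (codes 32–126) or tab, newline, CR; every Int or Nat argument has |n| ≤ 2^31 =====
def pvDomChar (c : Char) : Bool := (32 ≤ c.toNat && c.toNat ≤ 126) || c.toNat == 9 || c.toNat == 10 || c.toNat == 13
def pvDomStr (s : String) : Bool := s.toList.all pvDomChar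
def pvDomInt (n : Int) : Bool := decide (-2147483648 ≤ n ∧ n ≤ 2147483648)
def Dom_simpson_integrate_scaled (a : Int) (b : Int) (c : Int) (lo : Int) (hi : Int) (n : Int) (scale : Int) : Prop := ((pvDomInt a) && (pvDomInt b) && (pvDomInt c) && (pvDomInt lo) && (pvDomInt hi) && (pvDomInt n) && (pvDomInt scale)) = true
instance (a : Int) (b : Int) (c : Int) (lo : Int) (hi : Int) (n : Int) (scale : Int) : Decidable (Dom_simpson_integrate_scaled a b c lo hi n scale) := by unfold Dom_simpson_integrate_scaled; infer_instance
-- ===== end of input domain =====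

-- B replaces A's O(n) Simpson while-loop by closed-form polynomial formulas (in k = n//2)
-- for the weighted sums of 1, x, x² over the interior nodes: O(1) instead of O(n).

-- ===== PORT A =====
-- the while-loop of A: state (i, total), runs while i < n2
def pvLoopA (a b c lo scale h n2 : Int) (i total : Int) : Int :=
  if _hlt : i < n2 then
    let x : Int := lo + i * h
    let fx : Int := a * x * x + b * x * scale + c * scale * scale
    pvLoopA a b c lo scale h n2 (i + 1)
      (if PySem.Int.mod i 2 = 0 then total + 2 * fx else total + 4 * fx)
  else total
termination_by (n2 - i).toNat
decreasing_by omega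

def simpson_integrate_scaled (a : Int) (b : Int) (c : Int) (lo : Int) (hi : Int) (n : Int) (scale : Int) : Int :=
  let n2 : Int := if PySem.Int.mod n 2 ≠ 0 then n + 1 else n
  let h : Int := PySem.Int.floordiv (hi - lo) n2
  let f_lo : Int := a * lo * lo + b * lo * scale + c * scale * scale
  let f_hi : Int := a * hi * hi + b * hi * scale + c * scale * scale
  let total : Int := pvLoopA a b c lo scale h n2 1 (f_lo + f_hi)
  PySem.Int.floordiv (total * h) (3 * scale * scale)

-- ===== PORT B =====
def simpson_integrate_scaled_alt (a : Int) (b : Int) (c : Int) (lo : Int) (hi : Int) (n : Int) (scale : Int) : Int :=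
  let n2 : Int := if PySem.Int.mod n 2 ≠ 0 then n + 1 else n
  let h : Int := PySem.Int.floordiv (hi - lo) n2
  let f_lo : Int := a * lo * lo + b * lo * scale + c * scale * scale
  let f_hi : Int := a * hi * hi + b * hi * scale + c * scale * scale
  let total : Int :=
    if n2 ≥ 2 then
      let k : Int := PySem.Int.floordiv n2 2
      let w0 : Int := 6 * k - 2
      let w1 : Int := 6 * k * k - 2 * k
      let w2 : Int := 4 * k * k * (2 * k - 1)
      let s1 : Int := lo * w0 + h * w1
      let s2 : Int := lo * lo * w0 + 2 * lo * h * w1 + h * h * w2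
      f_lo + f_hi + a * s2 + b * scale * s1 + c * scale * scale * w0
    else f_lo + f_hi
  PySem.Int.floordiv (total * h) (3 * scale * scale)

-- ===== PRECONDITION & SPEC =====
-- Pre_ excludes only the inputs where the Python A raises ZeroDivisionError:
-- scale = 0 (final division), and n ∈ {0, -1} (the adjusted n becomes 0, so (hi-lo)//n raises).
def Pre_simpson_integrate_scaled (a : Int) (b : Int) (c : Int) (lo : Int) (hi : Int) (n : Int) (scale : Int) : Prop :=
  scale ≠ 0 ∧ n ≠ 0 ∧ n ≠ -1
instance (a : Int) (b : Int) (c : Int) (lo : Int) (hi : Int) (n : Int) (scale : Int) : Decidable (Pre_simpson_integrate_scaled a b c lo hi n scale) := by unfold Pre_simpson_integrate_scaled; infer_instance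

def pvWitness_simpson_integrate_scaled : Int × Int × Int × Int × Int × Int × Int := (1, 1, 1, 0, 4, 4, 1)

def Spec_simpson_integrate_scaled (a : Int) (b : Int) (c : Int) (lo : Int) (hi : Int) (n : Int) (scale : Int) (out : Int) : Prop := out = simpson_integrate_scaled_alt a b c lo hi n scale
instance (a : Int) (b : Int) (c : Int) (lo : Int) (hi : Int) (n : Int) (scale : Int) (out : Int) : Decidable (Spec_simpson_integrate_scaled a b c lo hi n scale out) := by unfold Spec_simpson_integrate_scaled; infer_instance

-- ===== CLAIM (what is proved, stated in full; the proofs are below) =====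
def Claim_equal_simpson_integrate_scaled : Prop := ∀ (a : Int) (b : Int) (c : Int) (lo : Int) (hi : Int) (n : Int) (scale : Int), Dom_simpson_integrate_scaled a b c lo hi n scale → Pre_simpson_integrate_scaled a b c lo hi n scale → Spec_simpson_integrate_scaled a b c lo hi n scale (simpson_integrate_scaled a b c lo hi n scale)

-- ===== LEMMAS AND PROOFS =====

-- one weighted interior term of A's loop
def pvTerm (a b c lo scale h i : Int) : Int :=
  (if PySem.Int.mod i 2 = 0 then (2:Int) else 4)
    * (a * (lo + i * h) * (lo + i * h) + b * (lo + i * h) * scale + c * scale * scale)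

-- B's closed-form weighted sum, as a polynomial in K = n2/2
def pvClosed (a b c lo scale h K : Int) : Int :=
  a * (lo * lo * (6*K-2) + 2 * lo * h * (6*K*K-2*K) + h * h * (4*K*K*(2*K-1)))
    + b * scale * (lo * (6*K-2) + h * (6*K*K-2*K)) + c * scale * scale * (6*K-2)

lemma pvLoopA_stop (a b c lo scale h n2 i total : Int) (hle : ¬ i < n2) :
    pvLoopA a b c lo scale h n2 i total = total := by
  rw [pvLoopA]; simp [hle]

lemma pvLoopA_eq_sum (a b c lo scale h : Int) (j : Nat) : ∀ (i total : Int),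
    pvLoopA a b c lo scale h (i + (j:Int)) i total
      = total + ∑ t ∈ Finset.range j, pvTerm a b c lo scale h (i + (t:Int)) := by
  induction j with
  | zero => intro i total; rw [pvLoopA]; simp
  | succ j ih =>
    intro i total
    rw [pvLoopA]
    rw [dif_pos (by push_cast; omega)]
    have harg : i + ((j:Nat)+1 : Nat) = (i+1) + (j:Int) := by push_cast; ring
    rw [harg, ih (i+1)]
    rw [Finset.sum_range_succ' (fun t => pvTerm a b c lo scale h (i + (t:Int))) j]
    have hsh : ∀ t : Nat, i + ((t:Nat)+1 : Nat) = (i+1) + (t:Int) := by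
      intro t; push_cast; ring
    simp only [hsh, Nat.cast_zero, add_zero]
    by_cases hm : PySem.Int.mod i 2 = 0
    · simp only [pvTerm, hm, if_true]; ring
    · simp only [pvTerm, hm, if_false]; ring

lemma pvSum_closed (a b c lo scale h : Int) (k : Nat) :
    ∑ t ∈ Finset.range (2*k+1), pvTerm a b c lo scale h (1 + (t:Int))
      = pvClosed a b c lo scale h ((k:Int)+1) := by
  induction k with
  | zero =>
    rw [show 2*0+1 = 1 from rfl, Finset.sum_range_one]
    simp only [pvTerm, pvClosed, Nat.cast_zero, add_zero]
    rw [if_neg (by decide)]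
    push_cast; ring
  | succ k ih =>
    have h1 : 2*(k+1)+1 = ((2*k+1) + 1) + 1 := by ring
    rw [h1, Finset.sum_range_succ, Finset.sum_range_succ, ih]
    have e1 : PySem.Int.mod (1 + ((2*k+1 : Nat):Int)) 2 = 0 := by
      rw [PySem.Int.mod_eq_emod_of_pos (by norm_num)]; push_cast; omega
    have e2 : PySem.Int.mod (1 + ((2*k+1+1 : Nat):Int)) 2 ≠ 0 := by
      rw [PySem.Int.mod_eq_emod_of_pos (by norm_num)]; push_cast; omega
    simp only [pvTerm]
    rw [if_pos e1, if_neg e2]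
    simp only [pvClosed]
    push_cast; ring

lemma pv_total (a b c lo scale h n2 total0 : Int) (heven : 2 ∣ n2) :
    pvLoopA a b c lo scale h n2 1 total0
      = if n2 ≥ 2 then total0 + pvClosed a b c lo scale h (PySem.Int.floordiv n2 2)
        else total0 := by
  by_cases hge : n2 ≥ 2
  · obtain ⟨K, hK⟩ := heven
    obtain ⟨k, hk⟩ : ∃ k : Nat, K = (k:Int) + 1 := ⟨(K-1).toNat, by omega⟩
    have hfd : PySem.Int.floordiv n2 2 = (k:Int) + 1 := by
      rw [PySem.Int.floordiv_eq_ediv_of_pos (by norm_num)]; omega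
    have hrw : n2 = 1 + ((2*k+1 : Nat):Int) := by push_cast; omega
    rw [if_pos hge, hfd, hrw, pvLoopA_eq_sum, pvSum_closed]
  · rw [if_neg hge, pvLoopA_stop _ _ _ _ _ _ _ _ _ (by omega)]

lemma pv_main (a b c lo hi n scale : Int) :
    simpson_integrate_scaled a b c lo hi n scale = simpson_integrate_scaled_alt a b c lo hi n scale := by
  unfold simpson_integrate_scaled simpson_integrate_scaled_alt
  dsimp only
  have heven : 2 ∣ (if PySem.Int.mod n 2 ≠ 0 then n + 1 else n) := by
    have hm := PySem.Int.mod_eq_emod_of_pos (a := n) (b := 2) (by norm_num)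
    rw [hm]
    by_cases hz : n % 2 = 0 <;> simp [hz] <;> omega
  rw [pv_total _ _ _ _ _ _ _ _ heven]
  by_cases hge : (if PySem.Int.mod n 2 ≠ 0 then n + 1 else n) ≥ 2
  · rw [if_pos hge, if_pos hge]
    simp only [pvClosed]; ring
  · rw [if_neg hge, if_neg hge]

-- ===== VERDICT (by name: the statement is the Claim_ definition above) =====
theorem simpson_integrate_scaled_spec : Claim_equal_simpson_integrate_scaled := by
  intro a b c lo hi n scale _ _
  unfold Spec_simpson_integrate_scaled
  exact pv_main a b c lo hi n scale
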